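-- pv_equiv track=rewrite | github.com/dexman/AdventOfCode | 2016/aoc07.py | is_tls
-- ===== SOURCE A (Python) =====
-- def is_tls(ip):
--     def is_abba(end_index):
--         ab = ip[end_index - 3: end_index - 1]
--         ba = ip[end_index - 1: end_index + 1]
--         reversed_ba = ''.join(reversed(ba))
--         return ab == reversed_ba and ba != reversed_ba
--     in_hypernet = False
--     has_abba = False
--     for ip_index, character in enumerate(ip):
--         if character == '[':
--             in_hypernet = True
--         elif character == ']':
--             in_hypernet = False
--         elif ip_index > 2 and is_abba(ip_index):
--             if in_hypernet:
--                 return False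
--             has_abba = True
--     return has_abba
-- ===== SOURCE B (Python) =====
-- def is_tls(ip):
--     # pass 1: bracket-toggle state at each position (state AFTER processing that char)
--     states = []
--     inh = False
--     for c in ip:
--         if c == '[':
--             inh = True
--         elif c == ']':
--             inh = False
--         states.append(inh)
--     # pass 2: all end positions of ABBA windows whose last char is not a bracket
--     def abba_end(i):
--         return (ip[i] not in '[]' and ip[i] == ip[i - 3]
--                 and ip[i - 1] == ip[i - 2] and ip[i] != ip[i - 1])
--     ends = [i for i in range(3, len(ip)) if abba_end(i)]
--     # TLS iff some ABBA window exists and none ends inside a hypernet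
--     return bool(ends) and not any(states[i] for i in ends)
-- ===== Notes on version B (the rewrite author's own statement) =====
-- stated objective: simpler
-- what changed: Replaces A's single stateful scan with early return by a parse-then-combine decomposition: one pass precomputes the bracket-toggle state at every position, a comprehension collects all ABBA-window end positions, and the result is the declarative combination that at least one window end exists and no window end lies in hypernet state.
import Mathlib
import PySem

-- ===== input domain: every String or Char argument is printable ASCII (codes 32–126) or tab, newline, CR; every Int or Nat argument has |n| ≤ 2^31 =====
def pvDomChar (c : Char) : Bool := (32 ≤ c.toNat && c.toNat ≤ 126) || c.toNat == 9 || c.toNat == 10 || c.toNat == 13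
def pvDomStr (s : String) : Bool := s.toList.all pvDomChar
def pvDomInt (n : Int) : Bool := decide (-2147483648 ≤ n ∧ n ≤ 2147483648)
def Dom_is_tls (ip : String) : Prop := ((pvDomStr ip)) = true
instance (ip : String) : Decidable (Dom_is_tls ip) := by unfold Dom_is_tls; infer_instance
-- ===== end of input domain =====

-- B replaces A's stateful early-return scan by a two-pass parse-then-combine decomposition (objective: simpler).

-- ===== PORT A =====
-- inner helper is_abba(end_index) of A, over the character list of ip
def isAbbaA (cs : List Char) (i : Int) : Bool :=
  let ab := PySem.List.slice cs (some (i - 3)) (some (i - 1))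
  let ba := PySem.List.slice cs (some (i - 1)) (some (i + 1))
  let reversed_ba := ba.reverse
  ab == reversed_ba && ba != reversed_ba

-- the 'for ip_index, character in enumerate(ip)' loop with early return
def loopA (cs : List Char) (i : Nat) (inh has : Bool) : Bool :=
  if h : i < cs.length then
    let c := cs[i]
    if c = '[' then loopA cs (i + 1) true has
    else if c = ']' then loopA cs (i + 1) false has
    else if decide (2 < i) && isAbbaA cs (i : Int) then
      (if inh then false else loopA cs (i + 1) inh true)
    else loopA cs (i + 1) inh has
  else has
termination_by cs.length - i

def is_tls (ip : String) : Bool := loopA ip.toList 0 false false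

-- ===== PORT B =====
-- pass 1 of Source B: bracket-toggle state after each character
def statesB : List Char → Bool → List Bool
  | [], _ => []
  | c :: rest, inh =>
    let inh' := if c = '[' then true else if c = ']' then false else inh
    inh' :: statesB rest inh'

-- helper abba_end(i) of Source B (indices are always in range when called)
def abbaEndB (cs : List Char) (i : Int) : Bool :=
  match PySem.List.pyGet? cs i, PySem.List.pyGet? cs (i - 3),
        PySem.List.pyGet? cs (i - 1), PySem.List.pyGet? cs (i - 2) with
  | some d, some a, some c, some b =>
      !(d = '[' || d = ']') && d == a && c == b && d != c
  | _, _, _, _ => false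

def is_tls_alt (ip : String) : Bool :=
  let cs := ip.toList
  let states := statesB cs false
  let ends := (PySem.List.pyRange 3 (cs.length : Int) 1).filter (abbaEndB cs)
  !ends.isEmpty && !(ends.any fun i => PySem.List.pyGetD states i false)

-- ===== PRECONDITION & SPEC =====
def Spec_is_tls (ip : String) (out : Bool) : Prop := out = is_tls_alt ip
instance (ip : String) (out : Bool) : Decidable (Spec_is_tls ip out) := by unfold Spec_is_tls; infer_instance

-- ===== CLAIM (what is proved, stated in full; the proofs are below) =====
def Claim_equal_is_tls : Prop := ∀ (ip : String), Dom_is_tls ip → Spec_is_tls ip (is_tls ip)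

-- ===== LEMMAS AND PROOFS =====

-- bracket-toggle step and the state after the first k characters
def pvStep (b : Bool) (c : Char) : Bool := if c = '[' then true else if c = ']' then false else b

def pvStAt (cs : List Char) (k : Nat) : Bool := (cs.take k).foldl pvStep false

-- "an ABBA window ends at position i" (Nat indices, total)
def pvPN (cs : List Char) (i : Nat) : Bool :=
  decide (3 ≤ i) && decide (i < cs.length) &&
  (let d := cs.getD i ' '
   let a := cs.getD (i - 3) ' '
   let c := cs.getD (i - 1) ' '
   let b := cs.getD (i - 2) ' '
   !(d = '[' || d = ']') && d == a && c == b && d != c)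

def pvScanP (cs : List Char) (k : Nat) : Bool :=
  (List.range' k (cs.length - k)).any (pvPN cs)

def pvScanBad (cs : List Char) (k : Nat) : Bool :=
  (List.range' k (cs.length - k)).any (fun i => pvPN cs i && pvStAt cs (i + 1))

theorem pvStAt_succ (cs : List Char) (k : Nat) (h : k < cs.length) :
    pvStAt cs (k + 1) = pvStep (pvStAt cs k) cs[k] := by
  unfold pvStAt
  rw [List.take_add_one, List.foldl_append]
  simp [h]

theorem statesB_getD (cs : List Char) (b : Bool) (k : Nat) (h : k < cs.length) :
    (statesB cs b).getD k false = (cs.take (k + 1)).foldl pvStep b := by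
  induction cs generalizing b k with
  | nil => simp at h
  | cons c rest ih =>
    cases k with
    | zero => simp [statesB, pvStep]
    | succ k =>
      simp only [statesB, List.getD_cons_succ, List.take_succ_cons, List.foldl_cons]
      exact ih _ k (by simpa using h)

-- the two characters of an in-range length-2 slice
theorem pvSlice_two (cs : List Char) (j : Nat) (h : j + 1 < cs.length) :
    PySem.List.slice cs (some (j : Int)) (some ((j : Int) + 2)) =
      [cs.getD j ' ', cs.getD (j + 1) ' '] := by
  have h2 : ((2 : Int)) = ((2 : Nat) : Int) := by norm_num
  rw [h2, PySem.List.slice_natCast_add]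
  rw [List.getD_eq_getElem cs ' ' (show j < cs.length by omega),
      List.getD_eq_getElem cs ' ' h]
  rw [List.drop_eq_getElem_cons (show j < cs.length by omega),
      List.drop_eq_getElem_cons h]
  rfl

theorem pvWindowBool (a b c d : Char) :
    (([a, b] == [d, c]) && ([c, d] != [d, c])) = ((d == a) && (c == b) && (d != c)) := by
  have hcomm : ∀ x y : Char, (x == y) = (y == x) := by
    intro x y
    by_cases h : x = y
    · simp [h]
    · simp [h, Ne.symm h]
  have hlist : ([c, d] != [d, c]) = (d != c) := by
    by_cases h : c = d
    · simp [h, bne]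
    · simp [bne, hcomm]
  have hpair : ([a, b] == [d, c]) = ((a == d) && (b == c)) := by
    by_cases h1 : a = d <;> by_cases h2 : b = c <;> simp [h1, h2]
  rw [hlist, hpair, hcomm a d, hcomm b c]

-- A's window helper agrees with the Nat-index window predicate
theorem isAbbaA_eq (cs : List Char) (i : Nat) (h3 : 3 ≤ i) (hn : i < cs.length) :
    isAbbaA cs (i : Int) =
      ((cs.getD i ' ' == cs.getD (i - 3) ' ') && (cs.getD (i - 1) ' ' == cs.getD (i - 2) ' ')
        && cs.getD i ' ' != cs.getD (i - 1) ' ') := by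
  obtain ⟨j, rfl⟩ : ∃ j, i = j + 3 := ⟨i - 3, by omega⟩
  unfold isAbbaA
  rw [show (((j + 3 : Nat) : Int) - 3) = (j : Int) by push_cast; ring]
  rw [show (((j + 3 : Nat) : Int) - 1) = (j : Int) + 2 by push_cast; ring]
  rw [pvSlice_two cs j (by omega)]
  rw [show ((j : Int) + 2) = ((j + 2 : Nat) : Int) by push_cast; ring]
  rw [show (((j + 3 : Nat) : Int) + 1) = ((j + 2 : Nat) : Int) + 2 by push_cast; ring]
  rw [pvSlice_two cs (j + 2) (by omega)]
  simp only [List.reverse_cons, List.reverse_nil, List.nil_append, List.cons_append]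
  simp only [show j + 3 - 3 = j by omega, show j + 3 - 1 = j + 2 by omega,
    show j + 3 - 2 = j + 1 by omega, show j + 2 + 1 = j + 3 by omega]
  exact pvWindowBool _ _ _ _

-- B's window helper agrees with the Nat-index window predicate (in range)
theorem abbaEndB_eq (cs : List Char) (i : Nat) (h3 : 3 ≤ i) (hn : i < cs.length) :
    abbaEndB cs (i : Int) = pvPN cs i := by
  unfold abbaEndB pvPN
  rw [show ((i : Int) - 3) = ((i - 3 : Nat) : Int) by omega,
      show ((i : Int) - 1) = ((i - 1 : Nat) : Int) by omega,
      show ((i : Int) - 2) = ((i - 2 : Nat) : Int) by omega]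
  rw [PySem.List.pyGet?_natCast, PySem.List.pyGet?_natCast,
      PySem.List.pyGet?_natCast, PySem.List.pyGet?_natCast]
  rw [List.getElem?_eq_getElem hn, List.getElem?_eq_getElem (show i - 3 < cs.length by omega),
      List.getElem?_eq_getElem (show i - 1 < cs.length by omega),
      List.getElem?_eq_getElem (show i - 2 < cs.length by omega)]
  simp [List.getD_eq_getElem?_getD,
    show i - 3 < cs.length by omega, show i - 1 < cs.length by omega,
    show i - 2 < cs.length by omega, h3, hn]

-- A's loop computes the declarative combination
theorem loopA_eq (m : Nat) : ∀ (cs : List Char) (k : Nat) (has : Bool), m = cs.length - k →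
    loopA cs k (pvStAt cs k) has = if pvScanBad cs k then false else has || pvScanP cs k := by
  induction m with
  | zero =>
    intro cs k has hm
    have hk : cs.length ≤ k := by omega
    rw [loopA]
    simp [Nat.not_lt.mpr hk, pvScanBad, pvScanP, show cs.length - k = 0 by omega]
  | succ m ih =>
    intro cs k has hm
    have hk : k < cs.length := by omega
    have hrange : List.range' k (cs.length - k) = k :: List.range' (k + 1) (cs.length - (k + 1)) := by
      rw [show cs.length - k = (cs.length - (k+1)) + 1 by omega, List.range'_succ]
    have hd : cs.getD k ' ' = cs[k] := List.getD_eq_getElem cs ' ' hk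
    rw [loopA]
    simp only [hk, dif_pos]
    by_cases hc1 : cs[k] = '['
    · have hst : pvStAt cs (k + 1) = true := by rw [pvStAt_succ cs k hk, hc1]; rfl
      have hPN : pvPN cs k = false := by
        unfold pvPN
        simp [List.getElem?_eq_getElem hk, hc1]
      have ihx := ih cs (k + 1) has (by omega)
      rw [hst] at ihx
      rw [if_pos hc1, ihx]
      unfold pvScanBad pvScanP
      rw [hrange]
      simp [hPN]
    · by_cases hc2 : cs[k] = ']'
      · have hst : pvStAt cs (k + 1) = false := by
          rw [pvStAt_succ cs k hk, hc2]; simp [pvStep]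
        have hPN : pvPN cs k = false := by
          unfold pvPN
          simp [List.getElem?_eq_getElem hk, hc2]
        have ihx := ih cs (k + 1) has (by omega)
        rw [hst] at ihx
        rw [if_neg hc1, if_pos hc2, ihx]
        unfold pvScanBad pvScanP
        rw [hrange]
        simp [hPN]
      · -- non-bracket character: state unchanged, the window test may fire
        have hst : pvStAt cs (k + 1) = pvStAt cs k := by
          rw [pvStAt_succ cs k hk]; simp [pvStep, hc1, hc2]
        have htest : (decide (2 < k) && isAbbaA cs (k : Int)) = pvPN cs k := by
          by_cases h3 : 3 ≤ k
          · rw [isAbbaA_eq cs k h3 hk]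
            unfold pvPN
            simp [show 2 < k by omega, h3, hk, hc1, hc2]
          · unfold pvPN
            simp [show ¬ (2 < k) by omega, show ¬ (3 ≤ k) by omega]
        rw [if_neg hc1, if_neg hc2, htest]
        by_cases hP : pvPN cs k = true
        · rw [if_pos hP]
          by_cases hin : pvStAt cs k = true
          · rw [if_pos hin]
            have hbad : pvScanBad cs k = true := by
              unfold pvScanBad
              rw [hrange]
              simp [hP, hst, hin]
            rw [hbad]; simp
          · rw [if_neg hin]
            have ihx := ih cs (k + 1) true (by omega)
            rw [hst] at ihx
            rw [ihx]
            have hin' : pvStAt cs k = false := by simpa using hin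
            have hb : pvScanBad cs k = pvScanBad cs (k + 1) := by
              unfold pvScanBad
              rw [hrange]
              simp [List.any_cons, hP, hst, hin']
            have hp : pvScanP cs k = true := by
              unfold pvScanP; rw [hrange]; simp [hP]
            rw [hb, hp]
            by_cases hbb : pvScanBad cs (k + 1) = true <;> simp [hbb]
        · rw [if_neg hP]
          have ihx := ih cs (k + 1) has (by omega)
          rw [hst] at ihx
          rw [ihx]
          have hPf : pvPN cs k = false := by simpa using hP
          unfold pvScanBad pvScanP
          rw [hrange]
          simp [hPf]

theorem pvFilter_isEmpty (p : α → Bool) (l : List α) : (l.filter p).isEmpty = !l.any p := by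
  induction l with
  | nil => rfl
  | cons x xs ih => by_cases h : p x <;> simp [h, ih]

theorem pvAny_filter (p q : α → Bool) (l : List α) :
    (l.filter p).any q = l.any (fun x => p x && q x) := by
  induction l with
  | nil => rfl
  | cons x xs ih => by_cases h : p x <;> simp [h, ih]

theorem pvAny_congr_mem (l : List α) (p q : α → Bool) (h : ∀ x ∈ l, p x = q x) :
    l.any p = l.any q := by
  induction l with
  | nil => rfl
  | cons x xs ih =>
    simp only [List.any_cons]
    rw [h x (by simp), ih fun y hy => h y (by simp [hy])]

-- the Int range of Source B is the Nat range (mapped), starting at 3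
theorem pvRange_cast (n : Nat) :
    PySem.List.pyRange 3 (n : Int) 1 = (List.range' 3 (n - 3)).map (fun i : Nat => (i : Int)) := by
  rw [PySem.List.pyRange_one, List.range'_eq_map_range]
  rw [show ((n : Int) - 3).toNat = n - 3 by omega]
  rw [List.map_map]
  apply List.map_congr_left
  intro k _
  simp

-- any over range' 0 n of a predicate false below 3 equals any over range' 3 (n-3)
theorem pvAny_range'_three (n : Nat) (p : Nat → Bool) (h : ∀ i < 3, p i = false) :
    (List.range' 0 n).any p = (List.range' 3 (n - 3)).any p := by
  by_cases hn : 3 ≤ n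
  · have e : List.range' 0 3 ++ List.range' 3 (n - 3) = List.range' 0 n := by
      have e2 := List.range'_append (s := 0) (m := 3) (n := n - 3) (step := 1)
      simpa [show 3 + (n - 3) = n by omega] using e2
    rw [← e, List.any_append]
    have h3 : (List.range' 0 3).any p = false := by
      have e3 : List.range' 0 3 = [0, 1, 2] := rfl
      rw [e3]; simp [h 0 (by omega), h 1 (by omega), h 2 (by omega)]
    rw [h3]; simp
  · have e0 : n - 3 = 0 := by omega
    rw [e0]
    have hfalse : (List.range' 0 n).any p = false := by
      rw [List.any_eq_false]
      intro i hi
      rw [List.mem_range'_1] at hi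
      simp [h i (by omega)]
    rw [hfalse]; rfl

theorem pvPN_false_low (cs : List Char) (i : Nat) (h : i < 3) : pvPN cs i = false := by
  unfold pvPN; simp [show ¬ (3 ≤ i) by omega]

-- B computes the same declarative combination
theorem is_tls_alt_eq (ip : String) :
    is_tls_alt ip = if pvScanBad ip.toList 0 then false else pvScanP ip.toList 0 := by
  unfold is_tls_alt
  set cs := ip.toList with hcs
  set n := cs.length with hn
  simp only []
  rw [pvRange_cast n, List.filter_map, List.isEmpty_map, pvFilter_isEmpty, List.any_map, pvAny_filter]
  have habba : ∀ i ∈ List.range' 3 (n - 3), (abbaEndB cs ∘ fun i : Nat => (i : Int)) i = pvPN cs i := by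
    intro i hi
    rw [List.mem_range'_1] at hi
    exact abbaEndB_eq cs i (by omega) (by omega)
  have hg : ∀ i ∈ List.range' 3 (n - 3),
      ((fun x => (abbaEndB cs ∘ fun i : Nat => (i : Int)) x &&
          ((fun i => PySem.List.pyGetD (statesB cs false) i false) ∘ fun i : Nat => (i : Int)) x) i)
        = (fun i => pvPN cs i && pvStAt cs (i + 1)) i := by
    intro i hi
    rw [List.mem_range'_1] at hi
    have hil : i < n := by omega
    simp only [Function.comp]
    rw [abbaEndB_eq cs i (by omega) hil]
    rw [PySem.List.pyGetD_natCast]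
    rw [statesB_getD cs false i hil]
    rfl
  rw [pvAny_congr_mem _ _ _ habba, pvAny_congr_mem _ _ _ hg]
  unfold pvScanP pvScanBad
  rw [Nat.sub_zero, ← hn]
  rw [pvAny_range'_three n (pvPN cs) (fun i hi => pvPN_false_low cs i hi)]
  rw [pvAny_range'_three n _ (fun i hi => by rw [pvPN_false_low cs i hi]; rfl)]
  by_cases hb : (List.range' 3 (n - 3)).any (fun i => pvPN cs i && pvStAt cs (i + 1)) = true
  · have hp : (List.range' 3 (n - 3)).any (pvPN cs) = true := by
      rw [List.any_eq_true] at hb ⊢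
      obtain ⟨i, hi, hpi⟩ := hb
      exact ⟨i, hi, (by simpa using hpi : pvPN cs i = true ∧ pvStAt cs (i+1) = true).1⟩
    simp [hb, hp]
  · have hb' := (by simpa using hb : (List.range' 3 (n - 3)).any (fun i => pvPN cs i && pvStAt cs (i + 1)) = false)
    simp [hb']

-- ===== VERDICT (by name: the statement is the Claim_ definition above) =====
theorem is_tls_spec : Claim_equal_is_tls := by
  intro ip _
  unfold Spec_is_tls
  unfold is_tls
  have h0 : pvStAt ip.toList 0 = false := rfl
  have l := loopA_eq (ip.toList.length - 0) ip.toList 0 false rfl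
  rw [h0] at l
  rw [l, is_tls_alt_eq ip]
  by_cases hb : pvScanBad ip.toList 0 = true <;> simp [hb]
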